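-- pv_equiv track=rewrite | github.com/GeorgeDittmar/Mimic | markov/PreProcess.py | generate_adjacent_terms
-- ===== SOURCE A (Python) =====
-- def generate_adjacent_terms(ngrams):
--     # get the current ngram and then extra the first element of the next ngram tuple
--     adjacent_list = []
--     for i in range(0, len(ngrams)):
--         if i == len(ngrams) - 1:
--             adjacent_tuple = (ngrams[i], "#END#")
--             adjacent_list.append(adjacent_tuple)
--         else:
--             adjacent_tuple = (ngrams[i], ngrams[i + 1].split(" ")[-1])
--             adjacent_list.append(adjacent_tuple)
--
--     return adjacent_list
-- ===== SOURCE B (Python) =====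
-- def generate_adjacent_terms(ngrams):
--     # Walk the list from the end, carrying the last word of the ngram just
--     # processed (initially the "#END#" sentinel), then reverse the result.
--     adjacent_list = []
--     next_word = "#END#"
--     for ng in reversed(ngrams):
--         adjacent_list.append((ng, next_word))
--         next_word = ng.split(" ")[-1]
--     adjacent_list.reverse()
--     return adjacent_list
-- ===== Notes on version B (the rewrite author's own statement) =====
-- stated objective: alternative
-- what changed: Replaces the forward index loop with its per-iteration boundary test by a backward traversal that carries the successor's last word as accumulator state (seeded with '#END#') and reverses the accumulated list at the end, eliminating index arithmetic and the boundary branch.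
import Mathlib
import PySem

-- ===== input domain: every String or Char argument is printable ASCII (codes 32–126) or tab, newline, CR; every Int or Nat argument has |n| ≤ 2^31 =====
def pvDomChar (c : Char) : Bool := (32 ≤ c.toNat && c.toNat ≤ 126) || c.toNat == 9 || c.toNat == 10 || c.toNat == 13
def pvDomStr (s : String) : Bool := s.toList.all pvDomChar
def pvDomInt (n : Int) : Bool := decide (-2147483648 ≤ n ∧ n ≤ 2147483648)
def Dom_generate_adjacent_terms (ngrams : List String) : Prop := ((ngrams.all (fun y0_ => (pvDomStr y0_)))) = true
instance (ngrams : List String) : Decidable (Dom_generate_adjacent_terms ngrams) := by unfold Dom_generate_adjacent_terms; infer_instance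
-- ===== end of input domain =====

-- B replaces A's forward index loop with its per-iteration boundary test by a backward
-- traversal carrying the successor's last word as accumulator state (seeded with "#END#"),
-- reversed at the end; objective: alternative (no index arithmetic, no boundary branch).

-- last word of an ngram: ng.split(" ")[-1]  (split? is none only for an empty separator, never here)
def pvLastWord (ng : String) : String :=
  PySem.List.pyGetD ((PySem.Str.split? ng " ").getD []) (-1) ""

-- ===== PORT A =====
def generate_adjacent_terms (ngrams : List String) : List (String × String) :=
  (PySem.List.pyRange 0 (ngrams.length : Int) 1).foldl
    (fun adjacent_list i =>
      if i = (ngrams.length : Int) - 1 then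
        adjacent_list ++ [(PySem.List.pyGetD ngrams i "", "#END#")]
      else
        adjacent_list ++ [(PySem.List.pyGetD ngrams i "", pvLastWord (PySem.List.pyGetD ngrams (i + 1) ""))])
    []

-- ===== PORT B =====
def generate_adjacent_terms_alt (ngrams : List String) : List (String × String) :=
  let r := ngrams.reverse.foldl
    (fun (st : List (String × String) × String) ng =>
      (st.1 ++ [(ng, st.2)], pvLastWord ng))
    ([], "#END#")
  r.1.reverse

-- ===== PRECONDITION & SPEC =====
def Spec_generate_adjacent_terms (ngrams : List String) (out : List (String × String)) : Prop := out = generate_adjacent_terms_alt ngrams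
instance (ngrams : List String) (out : List (String × String)) : Decidable (Spec_generate_adjacent_terms ngrams out) := by unfold Spec_generate_adjacent_terms; infer_instance

-- ===== CLAIM (what is proved, stated in full; the proofs are below) =====
def Claim_equal_generate_adjacent_terms : Prop := ∀ (ngrams : List String), Dom_generate_adjacent_terms ngrams → Spec_generate_adjacent_terms ngrams (generate_adjacent_terms ngrams)

-- ===== LEMMAS AND PROOFS =====

-- the word paired with the head of xs when w is the sentinel for the very last element
def pvHeadWord (xs : List String) (w : String) : String :=
  match xs with
  | [] => w
  | y :: _ => pvLastWord y

-- the common recursive characterisation of the adjacency list (last element paired with w)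
def pvAdj : List String → String → List (String × String)
  | [], _ => []
  | x :: xs, w => (x, pvHeadWord xs w) :: pvAdj xs w

theorem pvAdj_nil (w : String) : pvAdj [] w = [] := rfl

theorem pvAdj_cons (x : String) (xs : List String) (w : String) :
    pvAdj (x :: xs) w = (x, pvHeadWord xs w) :: pvAdj xs w := rfl

-- B's backward fold computes pvAdj reversed, together with the head's last word
theorem alt_foldl_eq (xs : List String) (l : List (String × String)) (w : String) :
    xs.reverse.foldl
      (fun (st : List (String × String) × String) ng =>
        (st.1 ++ [(ng, st.2)], pvLastWord ng)) (l, w)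
      = (l ++ (pvAdj xs w).reverse, pvHeadWord xs w) := by
  induction xs generalizing l with
  | nil => simp [pvAdj, pvHeadWord]
  | cons x xs ih =>
    simp only [List.reverse_cons, List.foldl_append, ih, List.foldl_cons, List.foldl_nil,
      pvAdj_cons, List.reverse_cons, pvHeadWord, List.append_assoc]

-- A's index fold as a map over the index range
theorem generate_adjacent_terms_eq_map (ngrams : List String) :
    generate_adjacent_terms ngrams =
      (List.range ngrams.length).map (fun (k : Nat) =>
        (PySem.List.pyGetD ngrams (k : Int) "",
          if (k : Int) = (ngrams.length : Int) - 1 then "#END#"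
          else pvLastWord (PySem.List.pyGetD ngrams ((k : Int) + 1) ""))) := by
  unfold generate_adjacent_terms
  have hbody : (fun (adjacent_list : List (String × String)) (i : Int) =>
      if i = (ngrams.length : Int) - 1 then
        adjacent_list ++ [(PySem.List.pyGetD ngrams i "", "#END#")]
      else
        adjacent_list ++ [(PySem.List.pyGetD ngrams i "", pvLastWord (PySem.List.pyGetD ngrams (i + 1) ""))]) =
      (fun adjacent_list i =>
        adjacent_list ++ [(PySem.List.pyGetD ngrams i "",
          if i = (ngrams.length : Int) - 1 then "#END#"
          else pvLastWord (PySem.List.pyGetD ngrams (i + 1) ""))]) := by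
    funext acc i; split_ifs <;> rfl
  rw [hbody, PySem.List.pyRange_zero_natCast, List.foldl_map,
    PySem.List.foldl_append_singleton_eq_map, List.nil_append]

-- the index map equals the recursive characterisation (with the "#END#" sentinel)
theorem map_eq_pvAdj (xs : List String) :
    (List.range xs.length).map (fun (k : Nat) =>
        (PySem.List.pyGetD xs (k : Int) "",
          if (k : Int) = (xs.length : Int) - 1 then "#END#"
          else pvLastWord (PySem.List.pyGetD xs ((k : Int) + 1) ""))) = pvAdj xs "#END#" := by
  induction xs with
  | nil => simp [pvAdj_nil]
  | cons x xs ih =>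
    rw [List.length_cons, List.range_succ_eq_map, List.map_cons, List.map_map]
    congr 1
    · -- head
      cases xs with
      | nil =>
        norm_num [pvAdj_cons, pvAdj_nil, pvHeadWord, PySem.List.pyGetD_natCast]
      | cons y rest =>
        split_ifs with h
        · exfalso; simp at h; omega
        · have h1 : (((0:Nat) : Int) + 1) = ((1:Nat) : Int) := by norm_num
          rw [PySem.List.pyGetD_natCast, h1, PySem.List.pyGetD_natCast]
          rfl
    · -- tail
      rw [← ih]
      apply List.map_congr_left
      intro k hk
      simp only [Function.comp_apply, Nat.succ_eq_add_one]
      have h2 : PySem.List.pyGetD (x :: xs) ((k + 1 : Nat) : Int) "" =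
          PySem.List.pyGetD xs ((k : Nat) : Int) "" := by
        rw [PySem.List.pyGetD_natCast, PySem.List.pyGetD_natCast]; rfl
      have h3 : PySem.List.pyGetD (x :: xs) (((k + 1 : Nat) : Int) + 1) "" =
          PySem.List.pyGetD xs (((k : Nat) : Int) + 1) "" := by
        have e1 : (((k + 1 : Nat) : Int) + 1) = ((k + 2 : Nat) : Int) := by push_cast; ring
        have e2 : (((k : Nat) : Int) + 1) = ((k + 1 : Nat) : Int) := by push_cast; ring
        rw [e1, e2, PySem.List.pyGetD_natCast, PySem.List.pyGetD_natCast]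
        rfl
      rw [h2, h3]
      split_ifs with h h' h' <;> first | rfl | (exfalso; omega)

-- ===== VERDICT (by name: the statement is the Claim_ definition above) =====
theorem generate_adjacent_terms_spec : Claim_equal_generate_adjacent_terms := by
  intro ngrams _
  show generate_adjacent_terms ngrams = generate_adjacent_terms_alt ngrams
  rw [generate_adjacent_terms_eq_map, map_eq_pvAdj]
  unfold generate_adjacent_terms_alt
  rw [alt_foldl_eq]
  simp
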